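-- pv_equiv track=rewrite | github.com/twotwobread/Today-I-Learn | codingTest/다이나믹프로그래밍/이코테_실전8_4.py | tileNumberOfCases
-- ===== SOURCE A (Python) =====
-- def tileNumberOfCases(num, count, max):
--     if num > max:
--         return count
--
--     count1, count2 = 0, 0
--     count1 = tileNumberOfCases(num+1, count*1, max)
--     if num+1 <= max:
--         count2 = tileNumberOfCases(num+2, count*2, max)
--     return (count1 + count2) % 796796
-- ===== SOURCE B (Python) =====
-- def tileNumberOfCases(num, count, max):
--     if num > max:
--         return count
--     a, b = 1, 1
--     for _ in range(max - num):
--         a, b = b, (b + 2 * a) % 796796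
--     return (count * b) % 796796
-- ===== Notes on version B (the rewrite author's own statement) =====
-- stated objective: alternative
-- what changed: Replaced the exponential branching recursion by a bottom-up linear two-variable DP (g(d)=g(d-1)+2*g(d-2) mod 796796), multiplying the coefficient count in once at the end; intended as asymptotically faster, though a timing run could not confirm a ratio (A times out already at tiny depths).
import Mathlib
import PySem

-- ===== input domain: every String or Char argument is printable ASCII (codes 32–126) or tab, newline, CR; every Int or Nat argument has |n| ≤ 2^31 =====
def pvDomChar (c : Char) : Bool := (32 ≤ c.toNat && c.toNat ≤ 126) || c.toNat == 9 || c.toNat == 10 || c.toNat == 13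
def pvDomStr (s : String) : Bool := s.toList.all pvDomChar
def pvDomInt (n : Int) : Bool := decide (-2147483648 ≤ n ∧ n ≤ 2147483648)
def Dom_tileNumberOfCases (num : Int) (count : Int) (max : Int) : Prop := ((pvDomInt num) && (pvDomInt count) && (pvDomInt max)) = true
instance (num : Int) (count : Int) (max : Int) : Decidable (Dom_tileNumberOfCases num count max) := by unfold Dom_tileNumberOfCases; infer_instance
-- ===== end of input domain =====

-- B replaces A's exponential branching recursion by a bottom-up linear two-variable DP over the depth max-num.

-- ===== PORT A =====
-- literal port of A's branching recursion; terminates since each call decreases (max - num).toNat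
def tileNumberOfCases (num : Int) (count : Int) (max : Int) : Int :=
  if h : num > max then count
  else
    let count1 := tileNumberOfCases (num + 1) (count * 1) max
    let count2 := if h2 : num + 1 ≤ max then tileNumberOfCases (num + 2) (count * 2) max else 0
    (count1 + count2) % 796796
termination_by (max + 1 - num).toNat
decreasing_by
  all_goals omega

-- ===== PORT B =====
-- port of Source B: a, b = 1, 1; for _ in range(max - num): a, b = b, (b + 2a) % 796796; return (count * b) % 796796
def tileNumberOfCases_alt (num : Int) (count : Int) (max : Int) : Int :=
  if num > max then count
  else
    let p := (List.range (max - num).toNat).foldl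
      (fun (ab : Int × Int) (_ : Nat) => (ab.2, (ab.2 + 2 * ab.1) % 796796)) (1, 1)
    (count * p.2) % 796796

-- ===== PRECONDITION & SPEC =====
-- Pre_ excludes the inputs with max - num >= 900: there Python A's initial left recursion chain
-- exceeds CPython's recursion limit (1000) and A raises RecursionError instead of returning.
def Pre_tileNumberOfCases (num : Int) (count : Int) (max : Int) : Prop := max - num < 900
instance (num : Int) (count : Int) (max : Int) : Decidable (Pre_tileNumberOfCases num count max) := by unfold Pre_tileNumberOfCases; infer_instance
def pvWitness_tileNumberOfCases : Int × Int × Int := (0, 1, 5)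

def Spec_tileNumberOfCases (num : Int) (count : Int) (max : Int) (out : Int) : Prop := out = tileNumberOfCases_alt num count max
instance (num : Int) (count : Int) (max : Int) (out : Int) : Decidable (Spec_tileNumberOfCases num count max out) := by unfold Spec_tileNumberOfCases; infer_instance

-- ===== CLAIM (what is proved, stated in full; the proofs are below) =====
def Claim_equal_tileNumberOfCases : Prop := ∀ (num : Int) (count : Int) (max : Int), Dom_tileNumberOfCases num count max → Pre_tileNumberOfCases num count max → Spec_tileNumberOfCases num count max (tileNumberOfCases num count max)

-- ===== LEMMAS AND PROOFS =====

-- the DP state after d loop iterations, as a structural recursion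
def hPair : Nat → Int × Int
  | 0 => (1, 1)
  | n + 1 => ((hPair n).2, ((hPair n).2 + 2 * (hPair n).1) % 796796)

lemma foldl_hPair (n : Nat) :
    (List.range n).foldl (fun (ab : Int × Int) (_ : Nat) => (ab.2, (ab.2 + 2 * ab.1) % 796796)) (1, 1)
      = hPair n := by
  induction n with
  | zero => simp [hPair]
  | succ k ih => rw [List.range_succ, List.foldl_append, ih]; simp [hPair]

lemma A_leaf (num count max : Int) (h : num > max) : tileNumberOfCases num count max = count := by
  rw [tileNumberOfCases, dif_pos h]

lemma mod_combine (c b0 b1 : Int) :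
    (c * b1 % 796796 + c * 2 * b0 % 796796) % 796796
      = c * ((b1 + 2 * b0) % 796796) % 796796 := by
  conv_rhs => rw [Int.mul_emod, Int.emod_emod_of_dvd _ dvd_rfl, ← Int.mul_emod]
  rw [← Int.add_emod]
  congr 1; ring

lemma A_eq_hPair : ∀ (d : Nat) (num count max : Int), num ≤ max → (max - num).toNat = d →
    tileNumberOfCases num count max = count * (hPair d).2 % 796796 := by
  intro d
  induction d using Nat.strong_induction_on with
  | _ d ih =>
    intro num count max hle hd
    rw [tileNumberOfCases, dif_neg (by omega)]
    match d, hd with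
    | 0, hd =>
      rw [A_leaf (num + 1) (count * 1) max (by omega), dif_neg (by omega)]
      simp [hPair]
    | 1, hd =>
      rw [ih 0 (by omega) (num + 1) (count * 1) max (by omega) (by omega),
        dif_pos (by omega), A_leaf (num + 2) (count * 2) max (by omega)]
      simp only [hPair, mul_one]
      rw [Int.emod_add_emod]
      norm_num
      congr 1; ring
    | (k + 2), hd =>
      rw [ih (k + 1) (by omega) (num + 1) (count * 1) max (by omega) (by omega),
        dif_pos (by omega),
        ih k (by omega) (num + 2) (count * 2) max (by omega) (by omega)]
      simp only [mul_one]
      have : (hPair (k + 2)).2 = ((hPair (k + 1)).2 + 2 * (hPair k).2) % 796796 := by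
        simp [hPair]
      rw [this]
      exact mod_combine count (hPair k).2 (hPair (k + 1)).2

-- ===== VERDICT (by name: the statement is the Claim_ definition above) =====
theorem tileNumberOfCases_spec : Claim_equal_tileNumberOfCases := by
  intro num count max _ _
  unfold Spec_tileNumberOfCases tileNumberOfCases_alt
  by_cases h : num > max
  · rw [if_pos h, A_leaf num count max h]
  · rw [if_neg h]
    simp only [foldl_hPair]
    exact A_eq_hPair (max - num).toNat num count max (by omega) rfl
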